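-- pv_equiv track=rewrite | github.com/Spon4ik/qBittorrent-rss-rules | app/routes/pages.py | _normalize_quality_token_selection
-- ===== SOURCE A (Python) =====
-- def _merge_search_terms(*term_lists: list[str]) -> list[str]:
--     merged: list[str] = []
--     seen: set[str] = set()
--     for term_list in term_lists:
--         for raw_term in term_list:
--             candidate = str(raw_term or "").strip()
--             if not candidate:
--                 continue
--             key = candidate.casefold()
--             if key in seen:
--                 continue
--             seen.add(key)
--             merged.append(candidate)
--     return merged
--
-- def _normalize_quality_token_selection(
--     include_tokens: list[str], exclude_tokens: list[str]
-- ) -> tuple[list[str], list[str]]: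
--     normalized_include = _merge_search_terms(include_tokens)
--     include_keys = {item.casefold() for item in normalized_include}
--     normalized_exclude = [
--         token
--         for token in _merge_search_terms(exclude_tokens)
--         if token.casefold() not in include_keys
--     ]
--     return normalized_include, normalized_exclude
-- ===== SOURCE B (Python) =====
-- def _sift(tokens, seen):
--     out = []
--     for raw in tokens:
--         term = str(raw or "").strip()
--         if not term:
--             continue
--         key = term.casefold()
--         if key not in seen:
--             seen.add(key)
--             out.append(term)
--     return out
--
--
-- def _normalize_quality_token_selection(include_tokens, exclude_tokens):
--     seen = set()
--     return _sift(include_tokens, seen), _sift(exclude_tokens, seen)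
-- ===== Notes on version B (the rewrite author's own statement) =====
-- stated objective: simpler
-- what changed: A dedups excludes in a separate pass and then filters them against a set comprehension of include keys; B threads one seen set through both lists, so excludes are deduped and include-filtered in a single pass with no second scan or key-set build.
import Mathlib
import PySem

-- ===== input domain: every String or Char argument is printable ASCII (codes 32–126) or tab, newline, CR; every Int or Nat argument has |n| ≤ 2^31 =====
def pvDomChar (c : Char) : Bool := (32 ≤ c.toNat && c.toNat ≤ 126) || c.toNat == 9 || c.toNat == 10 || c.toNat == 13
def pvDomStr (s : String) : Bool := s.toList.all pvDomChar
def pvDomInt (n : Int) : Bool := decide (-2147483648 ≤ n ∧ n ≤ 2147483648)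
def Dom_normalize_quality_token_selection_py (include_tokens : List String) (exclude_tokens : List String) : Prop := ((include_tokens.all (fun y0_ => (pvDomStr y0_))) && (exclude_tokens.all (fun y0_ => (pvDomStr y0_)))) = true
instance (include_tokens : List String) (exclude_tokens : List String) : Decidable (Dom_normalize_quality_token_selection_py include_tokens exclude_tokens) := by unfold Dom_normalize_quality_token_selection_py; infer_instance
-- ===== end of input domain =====

-- B replaces A's dedup-then-filter of excludes by threading one seen set through both lists (simpler, one pass over excludes).


-- ===== PORT A =====
-- _merge_search_terms(*term_lists); 'str(raw or "")' is the identity on str arguments;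
-- .casefold() is ported as PySem.Str.lower (exact on the ASCII domain).
def pvMergeSearchTerms (term_lists : List (List String)) : List String :=
  (term_lists.foldl
    (fun (st : List String × PySem.Set String) term_list =>
      term_list.foldl
        (fun (st : List String × PySem.Set String) raw_term =>
          let candidate := PySem.Str.strip raw_term
          if candidate == "" then st
          else
            let key := PySem.Str.lower candidate
            if PySem.Set.contains st.2 key then st
            else (st.1 ++ [candidate], PySem.Set.add st.2 key)) st)
    ([], PySem.Set.empty)).1

def normalize_quality_token_selection_py (include_tokens : List String) (exclude_tokens : List String) : List String × List String :=
  let normalized_include := pvMergeSearchTerms [include_tokens]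
  -- {item.casefold() for item in normalized_include}: consumed only via membership
  let include_keys : PySem.Set String := PySem.Set.ofList (normalized_include.map (fun item => PySem.Str.lower item))
  let normalized_exclude := (pvMergeSearchTerms [exclude_tokens]).filter
    (fun token => !(PySem.Set.contains include_keys (PySem.Str.lower token)))
  (normalized_include, normalized_exclude)

-- ===== PORT B =====
-- _sift(tokens, seen): mutates seen in place; ported as returning (out, final seen).
def pvSift (tokens : List String) (seen : PySem.Set String) : List String × PySem.Set String :=
  tokens.foldl
    (fun (st : List String × PySem.Set String) raw =>
      let term := PySem.Str.strip raw
      if term == "" then st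
      else
        let key := PySem.Str.lower term
        if PySem.Set.contains st.2 key then st
        else (st.1 ++ [term], PySem.Set.add st.2 key)) ([], seen)

def normalize_quality_token_selection_py_alt (include_tokens : List String) (exclude_tokens : List String) : List String × List String :=
  let r1 := pvSift include_tokens PySem.Set.empty
  let r2 := pvSift exclude_tokens r1.2
  (r1.1, r2.1)

-- ===== PRECONDITION & SPEC =====
def Spec_normalize_quality_token_selection_py (include_tokens : List String) (exclude_tokens : List String) (out : List String × List String) : Prop := out = normalize_quality_token_selection_py_alt include_tokens exclude_tokens
instance (include_tokens : List String) (exclude_tokens : List String) (out : List String × List String) : Decidable (Spec_normalize_quality_token_selection_py include_tokens exclude_tokens out) := by unfold Spec_normalize_quality_token_selection_py; infer_instance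

-- ===== CLAIM (what is proved, stated in full; the proofs are below) =====
def Claim_equal_normalize_quality_token_selection_py : Prop := ∀ (include_tokens : List String) (exclude_tokens : List String), Dom_normalize_quality_token_selection_py include_tokens exclude_tokens → Spec_normalize_quality_token_selection_py include_tokens exclude_tokens (normalize_quality_token_selection_py include_tokens exclude_tokens)

-- ===== LEMMAS AND PROOFS =====

-- the shared loop body (both Pythons' inner loops are this same step)
def pvStep (st : List String × PySem.Set String) (raw : String) : List String × PySem.Set String :=
  let term := PySem.Str.strip raw
  if term == "" then st
  else
    let key := PySem.Str.lower term
    if PySem.Set.contains st.2 key then st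
    else (st.1 ++ [term], PySem.Set.add st.2 key)

lemma pvPortA_eq (inc exc : List String) :
    normalize_quality_token_selection_py inc exc =
      ((inc.foldl pvStep ([], PySem.Set.empty)).1,
       (exc.foldl pvStep ([], PySem.Set.empty)).1.filter
         (fun token => !(PySem.Set.contains
            (PySem.Set.ofList ((inc.foldl pvStep ([], PySem.Set.empty)).1.map
              (fun item => PySem.Str.lower item)))
            (PySem.Str.lower token)))) := rfl

lemma pvPortB_eq (inc exc : List String) :
    normalize_quality_token_selection_py_alt inc exc =
      ((inc.foldl pvStep ([], PySem.Set.empty)).1,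
       (exc.foldl pvStep ([], (inc.foldl pvStep ([], PySem.Set.empty)).2)).1) := rfl

lemma pvContains_false_of_not_mem (s : PySem.Set String) (x : String) (h : x ∉ s) :
    PySem.Set.contains s x = false := by
  cases hc : PySem.Set.contains s x
  · rfl
  · exact absurd ((PySem.Set.contains_iff s x).mp hc) h

lemma pvStep_skip_empty (st : List String × PySem.Set String) (raw : String)
    (h : (PySem.Str.strip raw == "") = true) : pvStep st raw = st := by
  unfold pvStep; rw [if_pos h]

lemma pvStep_skip_seen (st : List String × PySem.Set String) (raw : String)
    (h1 : (PySem.Str.strip raw == "") = false)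
    (h2 : PySem.Set.contains st.2 (PySem.Str.lower (PySem.Str.strip raw)) = true) :
    pvStep st raw = st := by
  unfold pvStep
  rw [if_neg (by simp [h1]), if_pos h2]

lemma pvStep_emit (st : List String × PySem.Set String) (raw : String)
    (h1 : (PySem.Str.strip raw == "") = false)
    (h2 : PySem.Set.contains st.2 (PySem.Str.lower (PySem.Str.strip raw)) = false) :
    pvStep st raw = (st.1 ++ [PySem.Str.strip raw],
      PySem.Set.add st.2 (PySem.Str.lower (PySem.Str.strip raw))) := by
  unfold pvStep
  rw [if_neg (by simp [h1]), if_neg (by rw [h2]; simp)]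

-- accumulated output only grows by appends
lemma pvStep_append (ts : List String) : ∀ (out : List String) (seen : PySem.Set String),
    ts.foldl pvStep (out, seen) =
      (out ++ (ts.foldl pvStep ([], seen)).1, (ts.foldl pvStep ([], seen)).2) := by
  induction ts with
  | nil => intro out seen; simp
  | cons t ts ih =>
    intro out seen
    simp only [List.foldl_cons]
    cases h1 : (PySem.Str.strip t == "") with
    | true =>
      rw [pvStep_skip_empty (out, seen) t h1, pvStep_skip_empty ([], seen) t h1]
      exact ih out seen
    | false =>
      cases h2 : PySem.Set.contains seen (PySem.Str.lower (PySem.Str.strip t)) with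
      | true =>
        rw [pvStep_skip_seen (out, seen) t h1 h2, pvStep_skip_seen ([], seen) t h1 h2]
        exact ih out seen
      | false =>
        rw [pvStep_emit (out, seen) t h1 h2, pvStep_emit ([], seen) t h1 h2]
        simp only
        rw [ih (out ++ [PySem.Str.strip t]), ih ([] ++ [PySem.Str.strip t])]
        simp

-- the final seen set's members are exactly the lowered emitted terms
lemma pvSeen_invariant (ts : List String) : ∀ (out : List String) (seen : PySem.Set String),
    (∀ k, k ∈ seen ↔ k ∈ out.map (fun t => PySem.Str.lower t)) →
    ∀ k, k ∈ (ts.foldl pvStep (out, seen)).2 ↔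
      k ∈ ((ts.foldl pvStep (out, seen)).1).map (fun t => PySem.Str.lower t) := by
  induction ts with
  | nil => intro out seen h k; simpa using h k
  | cons t ts ih =>
    intro out seen h k
    simp only [List.foldl_cons]
    cases h1 : (PySem.Str.strip t == "") with
    | true =>
      rw [pvStep_skip_empty (out, seen) t h1]
      exact ih out seen h k
    | false =>
      cases h2 : PySem.Set.contains seen (PySem.Str.lower (PySem.Str.strip t)) with
      | true =>
        rw [pvStep_skip_seen (out, seen) t h1 h2]
        exact ih out seen h k
      | false =>
        rw [pvStep_emit (out, seen) t h1 h2]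
        refine ih _ _ ?_ k
        intro k'
        rw [PySem.Set.mem_add]
        simp only [List.map_append, List.map_cons, List.map_nil, List.mem_append,
          List.mem_singleton]
        rw [h k']

-- one pass seeded with S equals the unseeded pass filtered by S
lemma pvSeeded_eq_filter (ts : List String) : ∀ (S seenA seenB : PySem.Set String),
    (∀ k, k ∈ seenB ↔ (k ∈ S ∨ k ∈ seenA)) →
    (ts.foldl pvStep ([], seenB)).1 =
      ((ts.foldl pvStep ([], seenA)).1).filter
        (fun t => !(PySem.Set.contains S (PySem.Str.lower t))) := by
  induction ts with
  | nil => intro S seenA seenB h; simp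
  | cons t ts ih =>
    intro S seenA seenB h
    simp only [List.foldl_cons]
    cases h1 : (PySem.Str.strip t == "") with
    | true =>
      rw [pvStep_skip_empty ([], seenB) t h1, pvStep_skip_empty ([], seenA) t h1]
      exact ih S seenA seenB h
    | false =>
      by_cases hbk : PySem.Str.lower (PySem.Str.strip t) ∈ seenB
      · rw [pvStep_skip_seen ([], seenB) t h1 ((PySem.Set.contains_iff _ _).mpr hbk)]
        by_cases hak : PySem.Str.lower (PySem.Str.strip t) ∈ seenA
        · rw [pvStep_skip_seen ([], seenA) t h1 ((PySem.Set.contains_iff _ _).mpr hak)]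
          exact ih S seenA seenB h
        · -- A emits, B skips: S contains the key, so the filter drops the term
          have hSk : PySem.Str.lower (PySem.Str.strip t) ∈ S := by
            rcases (h _).mp hbk with hs | hs
            · exact hs
            · exact absurd hs hak
          rw [pvStep_emit ([], seenA) t h1 (pvContains_false_of_not_mem _ _ hak)]
          simp only
          rw [pvStep_append ts ([] ++ [PySem.Str.strip t]) _]
          simp only [List.nil_append, List.filter_append, List.filter_cons, List.filter_nil,
            (PySem.Set.contains_iff S _).mpr hSk, Bool.not_true, Bool.false_eq_true,
            if_false, List.nil_append]
          refine ih S (PySem.Set.add seenA (PySem.Str.lower (PySem.Str.strip t))) seenB ?_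
          intro k'
          rw [h k', PySem.Set.mem_add]
          constructor
          · rintro (hs | hs)
            · exact Or.inl hs
            · exact Or.inr (Or.inl hs)
          · rintro (hs | hs | hs)
            · exact Or.inl hs
            · exact Or.inr hs
            · subst hs; exact Or.inl hSk
      · -- both emit; the filter keeps the term
        have hak : PySem.Str.lower (PySem.Str.strip t) ∉ seenA :=
          fun hs => hbk ((h _).mpr (Or.inr hs))
        have hSk : PySem.Str.lower (PySem.Str.strip t) ∉ S :=
          fun hs => hbk ((h _).mpr (Or.inl hs))
        rw [pvStep_emit ([], seenB) t h1 (pvContains_false_of_not_mem _ _ hbk),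
          pvStep_emit ([], seenA) t h1 (pvContains_false_of_not_mem _ _ hak)]
        simp only
        rw [pvStep_append ts ([] ++ [PySem.Str.strip t]) _,
          pvStep_append ts ([] ++ [PySem.Str.strip t])
            (PySem.Set.add seenA (PySem.Str.lower (PySem.Str.strip t)))]
        simp only [List.nil_append, List.filter_cons,
          pvContains_false_of_not_mem _ _ hSk, Bool.not_false, if_true, List.cons_append,
          List.nil_append]
        have h' : ∀ k', k' ∈ PySem.Set.add seenB (PySem.Str.lower (PySem.Str.strip t)) ↔
            (k' ∈ S ∨ k' ∈ PySem.Set.add seenA (PySem.Str.lower (PySem.Str.strip t))) := by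
          intro k'
          constructor
          · intro hm
            rcases (PySem.Set.mem_add seenB _ k').mp hm with hm | hm
            · rcases (h k').mp hm with hs | hs
              · exact Or.inl hs
              · exact Or.inr ((PySem.Set.mem_add seenA _ k').mpr (Or.inl hs))
            · exact Or.inr ((PySem.Set.mem_add seenA _ k').mpr (Or.inr hm))
          · intro hm
            rcases hm with hs | hm
            · exact (PySem.Set.mem_add seenB _ k').mpr (Or.inl ((h k').mpr (Or.inl hs)))
            · rcases (PySem.Set.mem_add seenA _ k').mp hm with hs | hs
              · exact (PySem.Set.mem_add seenB _ k').mpr (Or.inl ((h k').mpr (Or.inr hs)))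
              · exact (PySem.Set.mem_add seenB _ k').mpr (Or.inr hs)
        rw [ih S (PySem.Set.add seenA (PySem.Str.lower (PySem.Str.strip t)))
          (PySem.Set.add seenB (PySem.Str.lower (PySem.Str.strip t))) h']

-- ===== VERDICT (by name: the statement is the Claim_ definition above) =====
theorem normalize_quality_token_selection_py_spec : Claim_equal_normalize_quality_token_selection_py := by
  intro include_tokens exclude_tokens _
  unfold Spec_normalize_quality_token_selection_py
  rw [pvPortA_eq, pvPortB_eq]
  refine Prod.ext rfl ?_
  simp only
  refine (pvSeeded_eq_filter exclude_tokens
    (PySem.Set.ofList ((include_tokens.foldl pvStep ([], PySem.Set.empty)).1.map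
      (fun item => PySem.Str.lower item)))
    PySem.Set.empty
    (include_tokens.foldl pvStep ([], PySem.Set.empty)).2 ?_).symm
  intro k
  have hinv := pvSeen_invariant include_tokens [] PySem.Set.empty
    (by intro k; simp [PySem.Set.empty]) k
  rw [hinv, PySem.Set.mem_ofList]
  simp [PySem.Set.empty]
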